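-- pv_equiv track=rewrite | github.com/taggedzi/rhythmslicer | src/rhythm_slicer/playlist_builder.py | reorder_items
-- ===== SOURCE A (Python) =====
-- from typing import Iterable, Iterator, Literal, TypeVar
--
-- T = TypeVar("T")
--
-- def reorder_items(
--     items: list[T],
--     selected_indices: Iterable[int],
--     direction: Literal["up", "down"],
-- ) -> tuple[list[T], list[int]]:
--     """Move selected indices up/down by one, preserving relative order."""
--     count = len(items)
--     selected = sorted({idx for idx in selected_indices if 0 <= idx < count})
--     if not selected:
--         return list(items), []
--     reordered = list(items)
--     selected_set = set(selected)
--     if direction == "up":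
--         for idx in selected:
--             if idx == 0 or (idx - 1) in selected_set:
--                 continue
--             reordered[idx - 1], reordered[idx] = reordered[idx], reordered[idx - 1]
--             selected_set.remove(idx)
--             selected_set.add(idx - 1)
--     else:
--         for idx in sorted(selected, reverse=True):
--             if idx >= count - 1 or (idx + 1) in selected_set:
--                 continue
--             reordered[idx + 1], reordered[idx] = reordered[idx], reordered[idx + 1]
--             selected_set.remove(idx)
--             selected_set.add(idx + 1)
--     return reordered, sorted(selected_set)
-- ===== SOURCE B (Python) =====
-- def reorder_items(items, selected_indices, direction):
--     """Move selected indices up/down by one, preserving relative order.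
--
--     Run-based rewrite: group the selected indices into maximal contiguous
--     runs and move each non-blocked run as a whole by rotating the adjacent
--     slice, instead of swapping element by element with a mutable set.
--     """
--     count = len(items)
--     sel = sorted({i for i in selected_indices if 0 <= i < count})
--     if not sel:
--         return list(items), []
--     # maximal contiguous runs of sel, as (start, end) inclusive
--     runs = []
--     start = prev = sel[0]
--     for i in sel[1:]:
--         if i == prev + 1:
--             prev = i
--         else:
--             runs.append((start, prev))
--             start = prev = i
--     runs.append((start, prev))
--     result = list(items)
--     positions = []
--     if direction == "up":
--         for s, e in runs:
--             if s > 0: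
--                 # the cell above the run rotates to the run's bottom
--                 result[s - 1:e + 1] = result[s:e + 1] + [result[s - 1]]
--                 positions.extend(range(s - 1, e))
--             else:
--                 positions.extend(range(s, e + 1))
--     else:
--         for s, e in reversed(runs):
--             if e < count - 1:
--                 # the cell below the run rotates to the run's top
--                 result[s:e + 2] = [result[e + 1]] + result[s:e + 1]
--                 positions.extend(range(s + 1, e + 2))
--             else:
--                 positions.extend(range(s, e + 1))
--     return result, sorted(positions)
-- ===== Notes on version B (the rewrite author's own statement) =====
-- stated objective: alternative
-- what changed: A moves elements one-by-one with adjacent swaps while mutating a set of selected indices; B groups the selected indices into maximal contiguous runs and moves each non-edge-blocked run at once by rotating the adjacent slice, collecting the new positions per run.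
import Mathlib
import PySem

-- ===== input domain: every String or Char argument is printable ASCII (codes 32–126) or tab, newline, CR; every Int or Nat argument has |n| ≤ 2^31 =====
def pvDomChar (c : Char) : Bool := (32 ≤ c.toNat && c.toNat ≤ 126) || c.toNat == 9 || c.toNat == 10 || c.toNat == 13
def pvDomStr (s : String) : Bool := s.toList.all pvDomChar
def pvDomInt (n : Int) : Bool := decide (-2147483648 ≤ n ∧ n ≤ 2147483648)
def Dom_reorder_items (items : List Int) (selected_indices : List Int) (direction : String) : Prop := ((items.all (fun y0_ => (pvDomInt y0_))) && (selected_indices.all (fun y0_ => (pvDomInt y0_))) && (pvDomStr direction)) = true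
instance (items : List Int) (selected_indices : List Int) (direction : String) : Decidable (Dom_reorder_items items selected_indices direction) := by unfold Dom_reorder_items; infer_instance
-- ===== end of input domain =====

-- B replaces A's element-by-element swap loop with a mutable set of selected indices by a
-- run-based pass: it groups the selected indices into maximal contiguous runs and moves each
-- non-blocked run at once by rotating the adjacent slice (objective: alternative algorithm).

-- ===== PORT A =====
-- A-side helpers: the loop bodies of A's two for-loops
def pvAUp (st : List Int × PySem.Set Int) (idx : Int) : List Int × PySem.Set Int :=
  if decide (idx = 0) || PySem.Set.contains st.2 (idx - 1) then st
  else
    -- idx-1 and idx are in range here (the filter keeps 0 ≤ idx < count), so pyGetD/pySetD are exact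
    (PySem.List.pySetD (PySem.List.pySetD st.1 (idx - 1) (PySem.List.pyGetD st.1 idx 0)) idx (PySem.List.pyGetD st.1 (idx - 1) 0),
     -- idx ∈ st.2 at this point, so Python's set.remove cannot raise; the .getD default is never used
     PySem.Set.add ((PySem.Set.remove? st.2 idx).getD st.2) (idx - 1))

def pvADown (count : Int) (st : List Int × PySem.Set Int) (idx : Int) : List Int × PySem.Set Int :=
  if decide (count - 1 ≤ idx) || PySem.Set.contains st.2 (idx + 1) then st
  else
    (PySem.List.pySetD (PySem.List.pySetD st.1 (idx + 1) (PySem.List.pyGetD st.1 idx 0)) idx (PySem.List.pyGetD st.1 (idx + 1) 0),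
     PySem.Set.add ((PySem.Set.remove? st.2 idx).getD st.2) (idx + 1))

def reorder_items (items : List Int) (selected_indices : List Int) (direction : String) : List Int × List Int :=
  let count : Int := items.length
  let selected : List Int :=
    PySem.List.sorted (PySem.Set.ofList (selected_indices.filter (fun idx => decide (0 ≤ idx ∧ idx < count)))) (fun x => x) false
  if selected = [] then (items, [])
  else
    let st :=
      if direction == "up" then
        selected.foldl pvAUp (items, PySem.Set.ofList selected)
      else
        (PySem.List.sorted selected (fun x => x) true).foldl (pvADown count) (items, PySem.Set.ofList selected)
    (st.1, PySem.List.sorted st.2 (fun x => x) false)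

-- ===== PORT B =====
-- B-side helpers: the run-grouping loop body and the two per-run rotation loop bodies
def pvBGroup (st : List (Int × Int) × Int × Int) (i : Int) : List (Int × Int) × Int × Int :=
  if i = st.2.2 + 1 then (st.1, st.2.1, i) else (st.1 ++ [(st.2.1, st.2.2)], i, i)

def pvBUp (st : List Int × List Int) (se : Int × Int) : List Int × List Int :=
  if 0 < se.1 then
    -- result[s-1:e+1] = result[s:e+1] + [result[s-1]]  (the cell above the run drops to its bottom)
    (PySem.List.slice st.1 none (some (se.1 - 1)) ++
       (PySem.List.slice st.1 (some se.1) (some (se.2 + 1)) ++ [PySem.List.pyGetD st.1 (se.1 - 1) 0]) ++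
       PySem.List.slice st.1 (some (se.2 + 1)) none,
     st.2 ++ PySem.List.pyRange (se.1 - 1) se.2 1)
  else (st.1, st.2 ++ PySem.List.pyRange se.1 (se.2 + 1) 1)

def pvBDown (count : Int) (st : List Int × List Int) (se : Int × Int) : List Int × List Int :=
  if se.2 < count - 1 then
    -- result[s:e+2] = [result[e+1]] + result[s:e+1]  (the cell below the run rises to its top)
    (PySem.List.slice st.1 none (some se.1) ++
       ([PySem.List.pyGetD st.1 (se.2 + 1) 0] ++ PySem.List.slice st.1 (some se.1) (some (se.2 + 1))) ++
       PySem.List.slice st.1 (some (se.2 + 2)) none,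
     st.2 ++ PySem.List.pyRange (se.1 + 1) (se.2 + 2) 1)
  else (st.1, st.2 ++ PySem.List.pyRange se.1 (se.2 + 1) 1)

def reorder_items_alt (items : List Int) (selected_indices : List Int) (direction : String) : List Int × List Int :=
  let count : Int := items.length
  let sel : List Int :=
    PySem.List.sorted (PySem.Set.ofList (selected_indices.filter (fun i => decide (0 ≤ i ∧ i < count)))) (fun x => x) false
  if sel = [] then (items, [])
  else
    let s0 := PySem.List.pyGetD sel 0 0   -- sel[0]; sel ≠ [] here, so exact
    let g := (PySem.List.slice sel (some 1) none).foldl pvBGroup ([], s0, s0)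
    let runs := g.1 ++ [(g.2.1, g.2.2)]
    let fin :=
      if direction == "up" then runs.foldl pvBUp (items, [])
      else runs.reverse.foldl (pvBDown count) (items, [])
    (fin.1, PySem.List.sorted fin.2 (fun x => x) false)

-- ===== PRECONDITION & SPEC =====
def Spec_reorder_items (items : List Int) (selected_indices : List Int) (direction : String) (out : List Int × List Int) : Prop := out = reorder_items_alt items selected_indices direction
instance (items : List Int) (selected_indices : List Int) (direction : String) (out : List Int × List Int) : Decidable (Spec_reorder_items items selected_indices direction out) := by unfold Spec_reorder_items; infer_instance

-- ===== CLAIM (what is proved, stated in full; the proofs are below) =====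
def Claim_equal_reorder_items : Prop := ∀ (items : List Int) (selected_indices : List Int) (direction : String), Dom_reorder_items items selected_indices direction → Spec_reorder_items items selected_indices direction (reorder_items items selected_indices direction)

-- ===== LEMMAS AND PROOFS =====

-- ---- run decomposition of the sorted selected list ----

def pvRunsRec (start prev : Int) : List Int → List (Int × Int)
  | [] => [(start, prev)]
  | i :: rest => if i = prev + 1 then pvRunsRec start i rest else (start, prev) :: pvRunsRec i i rest

def pvFlat : List (Int × Int) → List Int
  | [] => []
  | (s, e) :: rs => PySem.List.pyRange s (e + 1) 1 ++ pvFlat rs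

def pvGood (cnt : Int) : Int → List (Int × Int) → Prop
  | _, [] => True
  | lb, (s, e) :: rs => lb ≤ s ∧ s ≤ e ∧ e < cnt ∧ pvGood cnt (e + 2) rs

-- result / positions components of B's per-run steps
def pvSpliceUp (r : List Int) (s e : Int) : List Int :=
  PySem.List.slice r none (some (s - 1)) ++
    (PySem.List.slice r (some s) (some (e + 1)) ++ [PySem.List.pyGetD r (s - 1) 0]) ++
    PySem.List.slice r (some (e + 1)) none

def pvSpliceDown (r : List Int) (s e : Int) : List Int :=
  PySem.List.slice r none (some s) ++
    ([PySem.List.pyGetD r (e + 1) 0] ++ PySem.List.slice r (some s) (some (e + 1))) ++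
    PySem.List.slice r (some (e + 2)) none

def pvBUpR (r : List Int) (se : Int × Int) : List Int :=
  if 0 < se.1 then pvSpliceUp r se.1 se.2 else r

def pvBUpG (se : Int × Int) : List Int :=
  if 0 < se.1 then PySem.List.pyRange (se.1 - 1) se.2 1 else PySem.List.pyRange se.1 (se.2 + 1) 1

def pvBDownR (count : Int) (r : List Int) (se : Int × Int) : List Int :=
  if se.2 < count - 1 then pvSpliceDown r se.1 se.2 else r

def pvBDownG (count : Int) (se : Int × Int) : List Int :=
  if se.2 < count - 1 then PySem.List.pyRange (se.1 + 1) (se.2 + 2) 1 else PySem.List.pyRange se.1 (se.2 + 1) 1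

lemma pvBUp_eq (st : List Int × List Int) (se : Int × Int) :
    pvBUp st se = (pvBUpR st.1 se, st.2 ++ pvBUpG se) := by
  by_cases h : 0 < se.1 <;> simp [pvBUp, pvBUpR, pvBUpG, pvSpliceUp, h]

lemma pvBDown_eq (count : Int) (st : List Int × List Int) (se : Int × Int) :
    pvBDown count st se = (pvBDownR count st.1 se, st.2 ++ pvBDownG count se) := by
  by_cases h : se.2 < count - 1 <;> simp [pvBDown, pvBDownR, pvBDownG, pvSpliceDown, h]

lemma pvFoldPair {α : Type} (F : List Int → α → List Int) (G : α → List Int) :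
    ∀ (l : List α) (r : List Int) (p : List Int),
    l.foldl (fun st a => (F st.1 a, st.2 ++ G a)) (r, p) = (l.foldl F r, p ++ l.flatMap G) := by
  intro l
  induction l with
  | nil => simp
  | cons a l ih => intro r p; simp [ih, List.append_assoc]

lemma pvBGroup_fold : ∀ (l : List Int) (acc : List (Int × Int)) (start prev : Int),
    (l.foldl pvBGroup (acc, start, prev)).1 ++
      [((l.foldl pvBGroup (acc, start, prev)).2.1, (l.foldl pvBGroup (acc, start, prev)).2.2)] =
      acc ++ pvRunsRec start prev l := by
  intro l
  induction l with
  | nil => intro acc start prev; simp [pvRunsRec]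
  | cons i rest ih =>
    intro acc start prev
    simp only [List.foldl_cons, pvBGroup, pvRunsRec]
    by_cases h : i = prev + 1
    · simp only [h]; exact ih acc start (prev + 1)
    · simp only [if_neg h]; rw [ih]; simp [List.append_assoc]

lemma pvFlat_runsRec : ∀ (l : List Int) (start prev : Int), start ≤ prev →
    pvFlat (pvRunsRec start prev l) = PySem.List.pyRange start (prev + 1) 1 ++ l := by
  intro l
  induction l with
  | nil => intro start prev h; simp [pvRunsRec, pvFlat]
  | cons i rest ih =>
    intro start prev h
    simp only [pvRunsRec]
    by_cases hi : i = prev + 1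
    · subst hi
      rw [if_pos rfl, ih start (prev + 1) (by omega),
        PySem.List.pyRange_one_succ_right (a := start) (b := prev + 1) (by omega)]
      simp
    · rw [if_neg hi]
      simp only [pvFlat]
      rw [ih i i (le_refl i), PySem.List.pyRange_one_singleton]
      simp

lemma pvGood_runsRec (cnt : Int) : ∀ (l : List Int) (lb start prev : Int),
    lb ≤ start → start ≤ prev → prev < cnt → (prev :: l).Pairwise (· < ·) →
    (∀ i ∈ l, i < cnt) → pvGood cnt lb (pvRunsRec start prev l) := by
  intro l
  induction l with
  | nil => intro lb start prev h1 h2 h3 _ _; exact ⟨h1, h2, h3, trivial⟩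
  | cons i rest ih =>
    intro lb start prev h1 h2 h3 hp hc
    have hpi : prev < i := (List.pairwise_cons.mp hp).1 i (by simp)
    have hp' : (i :: rest).Pairwise (· < ·) := (List.pairwise_cons.mp hp).2
    simp only [pvRunsRec]
    by_cases hi : i = prev + 1
    · rw [if_pos hi]
      exact ih lb start i (by omega) (by omega) (hc i (by simp)) hp' (fun j hj => hc j (by simp [hj]))
    · rw [if_neg hi]
      exact ⟨h1, h2, h3, ih (prev + 2) i i (by omega) le_rfl (hc i (by simp)) hp'
        (fun j hj => hc j (by simp [hj]))⟩

-- bounds of pvFlat / positions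
lemma pvFlat_bounds (cnt : Int) : ∀ (rs : List (Int × Int)) (lb : Int), pvGood cnt lb rs →
    ∀ x ∈ pvFlat rs, lb ≤ x ∧ x < cnt := by
  intro rs
  induction rs with
  | nil => intro lb _ x hx; simp [pvFlat] at hx
  | cons se rs ih =>
    intro lb hg x hx
    obtain ⟨s, e⟩ := se
    obtain ⟨h1, h2, h3, h4⟩ := hg
    simp only [pvFlat, List.mem_append] at hx
    rcases hx with hx | hx
    · rw [PySem.List.mem_pyRange_one] at hx; omega
    · have := ih (e + 2) h4 x hx; omega

lemma pvUpPos_bounds (cnt : Int) : ∀ (rs : List (Int × Int)) (lb : Int), pvGood cnt lb rs →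
    ∀ x ∈ rs.flatMap pvBUpG, lb - 1 ≤ x ∧ x < cnt := by
  intro rs
  induction rs with
  | nil => intro lb _ x hx; simp at hx
  | cons se rs ih =>
    intro lb hg x hx
    obtain ⟨s, e⟩ := se
    obtain ⟨h1, h2, h3, h4⟩ := hg
    simp only [List.flatMap_cons, List.mem_append] at hx
    rcases hx with hx | hx
    · simp only [pvBUpG] at hx
      split_ifs at hx <;> rw [PySem.List.mem_pyRange_one] at hx <;> omega
    · have := ih (e + 2) h4 x hx; omega

lemma pvDownPos_bounds (cnt : Int) : ∀ (rs : List (Int × Int)) (lb : Int), pvGood cnt lb rs →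
    ∀ x ∈ rs.flatMap (pvBDownG cnt), lb ≤ x ∧ x < cnt := by
  intro rs
  induction rs with
  | nil => intro lb _ x hx; simp at hx
  | cons se rs ih =>
    intro lb hg x hx
    obtain ⟨s, e⟩ := se
    obtain ⟨h1, h2, h3, h4⟩ := hg
    simp only [List.flatMap_cons, List.mem_append] at hx
    rcases hx with hx | hx
    · simp only [pvBDownG] at hx
      split_ifs at hx <;> rw [PySem.List.mem_pyRange_one] at hx <;> omega
    · have := ih (e + 2) h4 x hx; omega

lemma pvUpPos_pairwise (cnt : Int) : ∀ (rs : List (Int × Int)) (lb : Int), pvGood cnt lb rs →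
    (rs.flatMap pvBUpG).Pairwise (· < ·) := by
  intro rs
  induction rs with
  | nil => intro lb _; simp
  | cons se rs ih =>
    intro lb hg
    obtain ⟨s, e⟩ := se
    obtain ⟨h1, h2, h3, h4⟩ := hg
    simp only [List.flatMap_cons]
    rw [List.pairwise_append]
    refine ⟨?_, ih (e + 2) h4, ?_⟩
    · simp only [pvBUpG]; split_ifs <;> exact PySem.List.pairwise_lt_pyRange_one _ _
    · intro a ha b hb
      have hb' := pvUpPos_bounds cnt rs (e + 2) h4 b hb
      simp only [pvBUpG] at ha
      split_ifs at ha <;> rw [PySem.List.mem_pyRange_one] at ha <;> omega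

lemma pvDownPos_pairwise (cnt : Int) : ∀ (rs : List (Int × Int)) (lb : Int), pvGood cnt lb rs →
    (rs.flatMap (pvBDownG cnt)).Pairwise (· < ·) := by
  intro rs
  induction rs with
  | nil => intro lb _; simp
  | cons se rs ih =>
    intro lb hg
    obtain ⟨s, e⟩ := se
    obtain ⟨h1, h2, h3, h4⟩ := hg
    simp only [List.flatMap_cons]
    rw [List.pairwise_append]
    refine ⟨?_, ih (e + 2) h4, ?_⟩
    · simp only [pvBDownG]; split_ifs <;> exact PySem.List.pairwise_lt_pyRange_one _ _
    · intro a ha b hb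
      have hb' := pvDownPos_bounds cnt rs (e + 2) h4 b hb
      simp only [pvBDownG] at ha
      split_ifs at ha <;> rw [PySem.List.mem_pyRange_one] at ha <;> omega

-- ---- Nat-level splice algebra ----

-- ---- the A-side loop over one run ----

lemma pvNatSwap (r : List Int) (j : Nat) (hj : 1 ≤ j) (hlen : j < r.length) :
    PySem.List.pySetD (PySem.List.pySetD r ((j : Int) - 1) (PySem.List.pyGetD r (j : Int) 0)) (j : Int) (PySem.List.pyGetD r ((j : Int) - 1) 0) =
    r.take (j - 1) ++ [r.getD j 0, r.getD (j - 1) 0] ++ r.drop (j + 1) := by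
  have hc : ((j : Int) - 1) = ((j - 1 : Nat) : Int) := by omega
  rw [hc, PySem.List.pySetD_natCast, PySem.List.pyGetD_natCast, PySem.List.pyGetD_natCast,
    PySem.List.pySetD_natCast]
  apply List.ext_getElem
  · simp; omega
  · intro i h1 h2
    simp only [List.getElem_set, List.getElem_append, List.getElem_take, List.getElem_drop,
      List.length_append, List.length_take, List.length_cons, List.length_nil] at *
    have ha : r.getD j 0 = r[j] := List.getD_eq_getElem r 0 hlen
    have hb : r.getD (j - 1) 0 = r[j - 1] := List.getD_eq_getElem r 0 (by omega)
    have hm : min (j - 1) r.length = j - 1 := by omega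
    simp only [ha, hb, hm]
    split_ifs with c1 c2 c3 c4 c5 <;> try (congr 1; omega)
    all_goals (try omega)
    all_goals first
      | simp [show i - (j - 1) = 0 from by omega]
      | simp [show i - (j - 1) = 1 from by omega]

lemma pvSpliceUp_nat (r : List Int) (j k : Nat) (_hj : 1 ≤ j) (_hk : j ≤ k) (_hlen : k < r.length) :
    pvSpliceUp r (j : Int) (k : Int) =
      r.take (j - 1) ++ ((r.drop j).take (k + 1 - j) ++ [r.getD (j - 1) 0]) ++ r.drop (k + 1) := by
  unfold pvSpliceUp
  rw [show ((j : Int) - 1) = ((j - 1 : Nat) : Int) from by omega,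
    show ((k : Int) + 1) = ((k + 1 : Nat) : Int) from by omega,
    PySem.List.slice_to_natCast, PySem.List.slice_natCast, PySem.List.slice_from_natCast,
    PySem.List.pyGetD_natCast]

lemma pvSpliceDown_nat (r : List Int) (j k : Nat) (_hk : j ≤ k) (_hlen : k + 1 < r.length) :
    pvSpliceDown r (j : Int) (k : Int) =
      r.take j ++ ([r.getD (k + 1) 0] ++ (r.drop j).take (k + 1 - j)) ++ r.drop (k + 2) := by
  unfold pvSpliceDown
  rw [show ((k : Int) + 1) = ((k + 1 : Nat) : Int) from by omega,
    show ((k : Int) + 2) = ((k + 2 : Nat) : Int) from by omega,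
    PySem.List.slice_to_natCast, PySem.List.slice_natCast, PySem.List.slice_from_natCast,
    PySem.List.pyGetD_natCast]

lemma pvSpliceUp_length (r : List Int) (j k : Nat) (hj : 1 ≤ j) (hk : j ≤ k) (hlen : k < r.length) :
    (pvSpliceUp r (j : Int) (k : Int)).length = r.length := by
  rw [pvSpliceUp_nat r j k hj hk hlen]
  simp
  omega

lemma pvSpliceDown_length (r : List Int) (j k : Nat) (_hk : j ≤ k) (_hlen : k + 1 < r.length) :
    (pvSpliceDown r (j : Int) (k : Int)).length = r.length := by
  rw [pvSpliceDown_nat r j k _hk _hlen]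
  simp
  omega

lemma pvDropTakeOne (r : List Int) (j : Nat) (h : j < r.length) :
    (r.drop j).take 1 = [r.getD j 0] := by
  rw [List.drop_eq_getElem_cons h, List.take_succ_cons, List.take_zero, List.getD_eq_getElem r 0 h]

lemma pvNatSwapDown (r : List Int) (j : Nat) (hlen : j + 1 < r.length) :
    PySem.List.pySetD (PySem.List.pySetD r ((j : Int) + 1) (PySem.List.pyGetD r (j : Int) 0)) (j : Int) (PySem.List.pyGetD r ((j : Int) + 1) 0) =
    r.take j ++ [r.getD (j + 1) 0, r.getD j 0] ++ r.drop (j + 2) := by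
  rw [show ((j : Int) + 1) = ((j + 1 : Nat) : Int) from by omega,
    PySem.List.pySetD_natCast, PySem.List.pyGetD_natCast, PySem.List.pyGetD_natCast,
    PySem.List.pySetD_natCast]
  apply List.ext_getElem
  · simp; omega
  · intro i h1 h2
    simp only [List.getElem_set, List.getElem_append, List.getElem_take, List.getElem_drop,
      List.length_append, List.length_take, List.length_cons, List.length_nil] at *
    have ha : r.getD (j + 1) 0 = r[j + 1] := List.getD_eq_getElem r 0 hlen
    have hb : r.getD j 0 = r[j] := List.getD_eq_getElem r 0 (by omega)
    have hm : min j r.length = j := by omega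
    simp only [ha, hb, hm]
    split_ifs <;> try (congr 1; omega)
    all_goals (try omega)
    all_goals first
      | simp [show i - j = 0 from by omega]
      | simp [show i - j = 1 from by omega]

lemma pvSpliceUp_absorb (r : List Int) (j k : Nat) (hj : 1 ≤ j) (hjk : j < k) (hlen : k < r.length) :
    pvSpliceUp (r.take (j - 1) ++ [r.getD j 0, r.getD (j - 1) 0] ++ r.drop (j + 1)) ((j + 1 : Nat) : Int) (k : Int) =
      pvSpliceUp r (j : Int) (k : Int) := by
  set a := r.getD j 0 with ha
  set b := r.getD (j - 1) 0 with hb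
  set r1 := r.take (j - 1) ++ [a, b] ++ r.drop (j + 1) with hr1
  have hlen1 : r1.length = r.length := by simp [hr1]; omega
  have hd1 : r1.drop (j + 1) = r.drop (j + 1) := by
    have h0 : (r.take (j - 1) ++ [a, b]).length = j + 1 := by simp; omega
    conv_lhs => rw [show j + 1 = (r.take (j - 1) ++ [a, b]).length from h0.symm, hr1]
    rw [List.drop_left]
  have ht1 : r1.take j = r.take (j - 1) ++ [a] := by
    rw [show j = (r.take (j - 1)).length + 1 from by simp; omega, hr1, List.append_assoc,
      List.take_length_add_append]
    simp
  have hdj : r1.drop j = b :: r.drop (j + 1) := by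
    have h2 : r1 = (r.take (j - 1) ++ [a]) ++ (b :: r.drop (j + 1)) := by simp [hr1]
    conv_lhs => rw [show j = (r.take (j - 1) ++ [a]).length from by simp; omega, h2]
    rw [List.drop_left]
  have hgj : r1.getD j 0 = b := by
    have h4 := List.drop_eq_getElem_cons (show j < r1.length from by omega)
    rw [hdj, hd1] at h4
    rw [List.getD_eq_getElem r1 0 (by omega), (List.cons.injEq _ _ _ _ |>.mp h4.symm).1]
  have hdk : r1.drop (k + 1) = r.drop (k + 1) := by
    have h5 : (r1.drop (j + 1)).drop (k - j) = (r.drop (j + 1)).drop (k - j) := by rw [hd1]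
    rw [List.drop_drop, List.drop_drop] at h5
    rw [show k + 1 = j + 1 + (k - j) from by omega]
    exact h5
  rw [pvSpliceUp_nat r1 (j + 1) k (by omega) (by omega) (by omega),
    pvSpliceUp_nat r j k hj (by omega) hlen]
  simp only [Nat.add_sub_cancel]
  rw [hd1, ht1, hgj, hdk, show k + 1 - (j + 1) = k - j from by omega, ← hb,
    show k + 1 - j = (k - j) + 1 from by omega,
    List.drop_eq_getElem_cons (show j < r.length from by omega), List.take_succ_cons,
    ← List.getD_eq_getElem r 0 (show j < r.length from by omega), ← ha]
  simp [List.append_assoc]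

lemma pvSpliceDown_absorb (r : List Int) (j k : Nat) (hjk : j < k) (hlen : k + 1 < r.length) :
    PySem.List.pySetD (PySem.List.pySetD (pvSpliceDown r ((j + 1 : Nat) : Int) (k : Int)) ((j : Int) + 1) (PySem.List.pyGetD (pvSpliceDown r ((j + 1 : Nat) : Int) (k : Int)) (j : Int) 0)) (j : Int) (PySem.List.pyGetD (pvSpliceDown r ((j + 1 : Nat) : Int) (k : Int)) ((j : Int) + 1) 0) =
      pvSpliceDown r (j : Int) (k : Int) := by
  set c := r.getD (k + 1) 0 with hc
  set r2 := pvSpliceDown r ((j + 1 : Nat) : Int) (k : Int) with hr2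
  have hnat : r2 = r.take (j + 1) ++ ([c] ++ (r.drop (j + 1)).take (k - j)) ++ r.drop (k + 2) := by
    rw [hr2, pvSpliceDown_nat r (j + 1) k (by omega) (by omega),
      show k + 1 - (j + 1) = k - j from by omega]
  have hlen2 : r2.length = r.length := by rw [hnat]; simp; omega
  have hA : (r.take (j + 1)).length = j + 1 := by simp; omega
  have htake : r2.take j = r.take j := by
    rw [hnat, List.take_append, List.take_append, hA,
      show j - (j + 1) = 0 from by omega, List.take_take,
      show min j (j + 1) = j from by omega]
    simp
    omega
  have hdrop2 : r2.drop (j + 2) = (r.drop (j + 1)).take (k - j) ++ r.drop (k + 2) := by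
    have h2 : r2 = (r.take (j + 1) ++ [c]) ++ ((r.drop (j + 1)).take (k - j) ++ r.drop (k + 2)) := by
      rw [hnat]; simp [List.append_assoc]
    conv_lhs => rw [show j + 2 = (r.take (j + 1) ++ [c]).length from by simp; omega, h2]
    rw [List.drop_left]
  have hdropj : r2.drop j = r.getD j 0 :: (c :: (r.drop (j + 1)).take (k - j) ++ r.drop (k + 2)) := by
    have h2 : r2 = (r.take j ++ (r.getD j 0 :: (c :: (r.drop (j + 1)).take (k - j) ++ r.drop (k + 2)))) := by
      rw [hnat, show r.take (j + 1) = r.take j ++ [r.getD j 0] from by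
        rw [List.take_add_one, List.getElem?_eq_getElem (by omega), List.getD_eq_getElem r 0 (by omega)]; rfl]
      simp
    conv_lhs => rw [show j = (r.take j).length from by simp; omega, h2]
    rw [List.drop_left]
  have hgetj : r2.getD j 0 = r.getD j 0 := by
    have h4 := List.drop_eq_getElem_cons (show j < r2.length from by omega)
    rw [hdropj] at h4
    rw [List.getD_eq_getElem r2 0 (by omega), (List.cons.injEq _ _ _ _ |>.mp h4.symm).1]
  have hgetj1 : r2.getD (j + 1) 0 = c := by
    have h5 : r2.drop (j + 1) = c :: ((r.drop (j + 1)).take (k - j) ++ r.drop (k + 2)) := by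
      have h2 : r2 = (r.take (j + 1) ++ (c :: ((r.drop (j + 1)).take (k - j) ++ r.drop (k + 2)))) := by
        rw [hnat]; simp
      conv_lhs => rw [show j + 1 = (r.take (j + 1)).length from hA.symm, h2]
      rw [List.drop_left]
    have h4 := List.drop_eq_getElem_cons (show j + 1 < r2.length from by omega)
    rw [h5] at h4
    rw [List.getD_eq_getElem r2 0 (by omega), (List.cons.injEq _ _ _ _ |>.mp h4.symm).1]
  rw [pvNatSwapDown r2 j (by omega), htake, hdrop2, hgetj, hgetj1,
    pvSpliceDown_nat r j k (by omega) hlen, ← hc,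
    List.drop_eq_getElem_cons (show j < r.length from by omega),
    show k + 1 - j = (k - j) + 1 from by omega, List.take_succ_cons,
    ← List.getD_eq_getElem r 0 (by omega)]
  simp [List.append_assoc]

lemma pvContains_false (S : PySem.Set Int) (x : Int) (h : x ∉ S) : PySem.Set.contains S x = false := by
  rw [← Bool.not_eq_true]
  intro hc
  exact h ((PySem.Set.contains_iff (s := S) (x := x)).mp hc)

lemma pvAUp_swap (r : List Int) (S : PySem.Set Int) (s : Int) (h1 : s ≠ 0) (h2 : (s - 1) ∉ S)
    (h3 : s ∈ S) :
    pvAUp (r, S) s =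
      (PySem.List.pySetD (PySem.List.pySetD r (s - 1) (PySem.List.pyGetD r s 0)) s (PySem.List.pyGetD r (s - 1) 0),
       PySem.Set.add (PySem.Set.discard S s) (s - 1)) := by
  simp only [pvAUp, decide_eq_false h1, pvContains_false S (s - 1) h2, Bool.or_self,
    Bool.false_eq_true, if_false, PySem.Set.remove?_of_mem h3, Option.getD_some]

lemma pvMoveUp : ∀ (n : Nat) (s : Int) (r : List Int) (S : PySem.Set Int),
    1 ≤ s → s + n < (r.length : Int) → S.Nodup → (s - 1) ∉ S →
    (∀ i : Int, s ≤ i → i ≤ s + n → i ∈ S) →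
    ∃ S', (PySem.List.pyRange s (s + n + 1) 1).foldl pvAUp (r, S) = (pvSpliceUp r s (s + n), S') ∧
      S'.Nodup ∧ (∀ x, x ∈ S' ↔ (x ∈ S ∧ ¬(s ≤ x ∧ x ≤ s + n)) ∨ (s - 1 ≤ x ∧ x ≤ s + n - 1)) := by
  intro n
  induction n with
  | zero =>
    intro s r S hs hlen hnd hnot hmem
    obtain ⟨j, rfl⟩ : ∃ j : Nat, s = (j : Int) := ⟨s.toNat, by omega⟩
    refine ⟨PySem.Set.add (PySem.Set.discard S j) ((j : Int) - 1), ?_, ?_, ?_⟩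
    · rw [show (j : Int) + (0 : Nat) + 1 = (j : Int) + 1 from by push_cast; ring,
        PySem.List.pyRange_one_singleton, List.foldl_cons, List.foldl_nil,
        pvAUp_swap r S j (by omega) hnot (hmem j le_rfl (by omega))]
      rw [show (j : Int) + (0 : Nat) = (j : Int) from by push_cast; ring,
        pvNatSwap r j (by omega) (by omega), pvSpliceUp_nat r j j (by omega) le_rfl (by omega),
        show j + 1 - j = 1 from by omega, pvDropTakeOne r j (by omega)]
      simp
    · exact PySem.Set.nodup_add _ _ (PySem.Set.nodup_discard _ _ hnd)
    · intro x
      rw [PySem.Set.mem_add, PySem.Set.mem_discard]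
      by_cases hx : x ∈ S <;> simp [hx] <;> omega
  | succ n ih =>
    intro s r S hs hlen hnd hnot hmem
    obtain ⟨j, rfl⟩ : ∃ j : Nat, s = (j : Int) := ⟨s.toNat, by omega⟩
    have hcons : PySem.List.pyRange (j : Int) ((j : Int) + (↑(n + 1) : Int) + 1) 1 =
        (j : Int) :: PySem.List.pyRange ((j : Int) + 1) (((j : Int) + 1) + (n : Int) + 1) 1 := by
      rw [PySem.List.pyRange_one_cons (by push_cast; omega)]
      congr 1
      push_cast; ring
    rw [hcons, List.foldl_cons, pvAUp_swap r S j (by omega) hnot (hmem j le_rfl (by push_cast; omega))]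
    have hr1 : PySem.List.pySetD (PySem.List.pySetD r ((j : Int) - 1) (PySem.List.pyGetD r (j : Int) 0)) (j : Int) (PySem.List.pyGetD r ((j : Int) - 1) 0) =
        r.take (j - 1) ++ [r.getD j 0, r.getD (j - 1) 0] ++ r.drop (j + 1) :=
      pvNatSwap r j (by omega) (by omega)
    rw [hr1]
    set r1 := r.take (j - 1) ++ [r.getD j 0, r.getD (j - 1) 0] ++ r.drop (j + 1) with hr1d
    set S1 := PySem.Set.add (PySem.Set.discard S (j : Int)) ((j : Int) - 1) with hS1
    have hlen1 : r1.length = r.length := by rw [hr1d]; simp; omega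
    have hS1mem : ∀ x, x ∈ S1 ↔ (x ∈ S ∧ x ≠ (j : Int)) ∨ x = (j : Int) - 1 := by
      intro x
      rw [hS1, PySem.Set.mem_add, PySem.Set.mem_discard]
    obtain ⟨S'', heq, hnd'', hmem''⟩ := ih ((j : Int) + 1) r1 S1
      (by omega) (by push_cast at hlen ⊢; omega)
      (PySem.Set.nodup_add _ _ (PySem.Set.nodup_discard _ _ hnd))
      (by rw [show (j : Int) + 1 - 1 = (j : Int) from by ring]
          intro hx
          rcases (hS1mem _).mp hx with ⟨_, hne⟩ | hne
          · exact hne rfl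
          · omega)
      (by intro i hi1 hi2
          refine (hS1mem i).mpr (Or.inl ⟨hmem i (by omega) (by push_cast at hi2 ⊢; omega), by omega⟩))
    rw [heq]
    refine ⟨S'', ?_, hnd'', ?_⟩
    · congr 1
      have habs := pvSpliceUp_absorb r j (j + 1 + n) (by omega) (by omega) (by omega)
      rw [show ((j + 1 + n : Nat) : Int) = (j : Int) + 1 + (n : Int) from by push_cast; ring,
        show ((j + 1 : Nat) : Int) = (j : Int) + 1 from by push_cast; ring] at habs
      rw [← hr1d] at habs
      rw [habs]
      congr 1
      push_cast; ring
    · intro x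
      rw [hmem'' x]
      have hSx := hS1mem x
      by_cases hx : x ∈ S <;> by_cases hx1 : x ∈ S1 <;> simp [hx, hx1] at hSx ⊢ <;> omega

lemma pvSkipUp : ∀ (n : Nat) (r : List Int) (S : PySem.Set Int),
    (∀ i : Int, 1 ≤ i → i ≤ n → (i - 1) ∈ S) →
    (PySem.List.pyRange 0 ((n : Int) + 1) 1).foldl pvAUp (r, S) = (r, S) := by
  intro n
  induction n with
  | zero =>
    intro r S _
    rw [show ((0 : Nat) : Int) + 1 = 0 + 1 from by norm_num, PySem.List.pyRange_one_singleton]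
    simp [pvAUp]
  | succ n ih =>
    intro r S h
    rw [show ((n + 1 : Nat) : Int) + 1 = ((n : Int) + 1) + 1 from by push_cast; ring,
      PySem.List.pyRange_one_succ_right (by omega), List.foldl_append,
      ih r S (fun i h1 h2 => h i h1 (by push_cast at h2 ⊢; omega))]
    have hmem : ((n : Int) + 1 - 1) ∈ S :=
      h ((n : Int) + 1) (by omega) (by push_cast; omega)
    simp only [List.foldl_cons, List.foldl_nil, pvAUp,
      (PySem.Set.contains_iff (s := S) (x := (n : Int) + 1 - 1)).mpr hmem, Bool.or_true, if_true]

lemma pvADown_swap (cnt : Int) (r : List Int) (S : PySem.Set Int) (s : Int) (h1 : ¬(cnt - 1 ≤ s))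
    (h2 : (s + 1) ∉ S) (h3 : s ∈ S) :
    pvADown cnt (r, S) s =
      (PySem.List.pySetD (PySem.List.pySetD r (s + 1) (PySem.List.pyGetD r s 0)) s (PySem.List.pyGetD r (s + 1) 0),
       PySem.Set.add (PySem.Set.discard S s) (s + 1)) := by
  simp only [pvADown, decide_eq_false h1, pvContains_false S (s + 1) h2, Bool.or_self,
    Bool.false_eq_true, if_false, PySem.Set.remove?_of_mem h3, Option.getD_some]

lemma pvMoveDown (cnt : Int) : ∀ (n : Nat) (s : Int) (r : List Int) (S : PySem.Set Int),
    0 ≤ s → s + n + 1 ≤ cnt - 1 → (r.length : Int) = cnt → S.Nodup → (s + n + 1) ∉ S →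
    (∀ i : Int, s ≤ i → i ≤ s + n → i ∈ S) →
    ∃ S', (PySem.List.pyRange s (s + n + 1) 1).foldr (fun idx st => pvADown cnt st idx) (r, S) =
        (pvSpliceDown r s (s + n), S') ∧
      S'.Nodup ∧ (∀ x, x ∈ S' ↔ (x ∈ S ∧ ¬(s ≤ x ∧ x ≤ s + n)) ∨ (s + 1 ≤ x ∧ x ≤ s + n + 1)) := by
  intro n
  induction n with
  | zero =>
    intro s r S hs hub hlen hnd hnot hmem
    obtain ⟨j, rfl⟩ : ∃ j : Nat, s = (j : Int) := ⟨s.toNat, by omega⟩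
    refine ⟨PySem.Set.add (PySem.Set.discard S j) ((j : Int) + 1), ?_, ?_, ?_⟩
    · rw [show (j : Int) + (0 : Nat) + 1 = (j : Int) + 1 from by push_cast; ring,
        PySem.List.pyRange_one_singleton]
      simp only [List.foldr_cons, List.foldr_nil]
      rw [pvADown_swap cnt r S j (by push_cast at hub; omega) (by simpa using hnot) (hmem j le_rfl (by omega))]
      rw [show (j : Int) + (0 : Nat) = (j : Int) from by push_cast; ring,
        pvNatSwapDown r j (by omega), pvSpliceDown_nat r j j le_rfl (by omega),
        show j + 1 - j = 1 from by omega, pvDropTakeOne r j (by omega)]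
      simp
    · exact PySem.Set.nodup_add _ _ (PySem.Set.nodup_discard _ _ hnd)
    · intro x
      rw [PySem.Set.mem_add, PySem.Set.mem_discard]
      by_cases hx : x ∈ S <;> simp [hx] <;> omega
  | succ n ih =>
    intro s r S hs hub hlen hnd hnot hmem
    obtain ⟨j, rfl⟩ : ∃ j : Nat, s = (j : Int) := ⟨s.toNat, by omega⟩
    have hcons : PySem.List.pyRange (j : Int) ((j : Int) + (↑(n + 1) : Int) + 1) 1 =
        (j : Int) :: PySem.List.pyRange ((j : Int) + 1) (((j : Int) + 1) + (n : Int) + 1) 1 := by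
      rw [PySem.List.pyRange_one_cons (by push_cast; omega)]
      congr 1
      push_cast; ring
    obtain ⟨S1, heq, hnd1, hmem1⟩ := ih ((j : Int) + 1) r S (by omega)
      (by push_cast at hub ⊢; omega) hlen hnd
      (by intro hx; apply hnot; rw [show (j:Int) + (↑(n+1):Int) + 1 = (j:Int) + 1 + (n:Int) + 1 from by push_cast; ring]; exact hx)
      (fun i h1 h2 => hmem i (by omega) (by push_cast at h2 ⊢; omega))
    rw [hcons, List.foldr_cons, heq]
    have hs1 : ((j : Int) + 1) ∉ S1 := by
      intro hx
      rcases (hmem1 _).mp hx with ⟨_, hno⟩ | hno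
      · exact hno ⟨by omega, by omega⟩
      · omega
    rw [pvADown_swap cnt _ S1 j (by push_cast at hub; omega) hs1
      ((hmem1 _).mpr (Or.inl ⟨hmem j le_rfl (by omega), by omega⟩))]
    refine ⟨PySem.Set.add (PySem.Set.discard S1 j) ((j : Int) + 1), ?_, ?_, ?_⟩
    · congr 1
      have habs := pvSpliceDown_absorb r j (j + 1 + n) (by omega) (by push_cast at hub; omega)
      rw [show ((j + 1 + n : Nat) : Int) = (j : Int) + 1 + (n : Int) from by push_cast; ring,
        show ((j + 1 : Nat) : Int) = (j : Int) + 1 from by push_cast; ring] at habs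
      rw [habs]
      congr 1
      push_cast; ring
    · exact PySem.Set.nodup_add _ _ (PySem.Set.nodup_discard _ _ hnd1)
    · intro x
      rw [PySem.Set.mem_add, PySem.Set.mem_discard, hmem1 x]
      by_cases hx : x ∈ S <;> simp [hx] <;> omega

lemma pvSkipDown (cnt : Int) : ∀ (n : Nat) (r : List Int) (S : PySem.Set Int),
    (∀ i : Int, cnt - 1 - n ≤ i → i < cnt - 1 → (i + 1) ∈ S) →
    (PySem.List.pyRange (cnt - 1 - n) (cnt - 1 + 1) 1).foldr (fun idx st => pvADown cnt st idx) (r, S) = (r, S) := by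
  intro n
  induction n with
  | zero =>
    intro r S _
    rw [show cnt - 1 - ((0 : Nat) : Int) = cnt - 1 from by push_cast; ring,
      PySem.List.pyRange_one_singleton]
    simp [pvADown]
  | succ n ih =>
    intro r S h
    rw [show cnt - 1 - ((n + 1 : Nat) : Int) = cnt - 1 - (n : Int) - 1 from by push_cast; ring,
      PySem.List.pyRange_one_cons (by omega),
      show cnt - 1 - (n : Int) - 1 + 1 = cnt - 1 - (n : Int) from by ring,
      List.foldr_cons, ih r S (fun i h1 h2 => h i (by push_cast at h1 ⊢; omega) h2)]
    have hmem : (cnt - 1 - (n : Int) - 1 + 1) ∈ S := by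
      have := h (cnt - 1 - (n : Int) - 1) (by push_cast; omega) (by omega)
      exact this
    simp only [pvADown,
      (PySem.Set.contains_iff (s := S) (x := cnt - 1 - (n : Int) - 1 + 1)).mpr hmem, Bool.or_true, if_true]

-- ---- the A-side loop over all runs ----

lemma pvMainUp (cnt : Int) : ∀ (rs : List (Int × Int)) (lb : Int) (r : List Int) (S : PySem.Set Int) (P : List Int),
    pvGood cnt lb rs → 0 ≤ lb → (r.length : Int) = cnt →
    S.Nodup → (∀ x, x ∈ S ↔ x ∈ P ∨ x ∈ pvFlat rs) → (∀ p ∈ P, p ≤ lb - 2) →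
    ((pvFlat rs).foldl pvAUp (r, S)).1 = rs.foldl pvBUpR r ∧
    (((pvFlat rs).foldl pvAUp (r, S)).1.length : Int) = cnt ∧
    ((pvFlat rs).foldl pvAUp (r, S)).2.Nodup ∧
    (∀ x, x ∈ ((pvFlat rs).foldl pvAUp (r, S)).2 ↔ x ∈ P ∨ x ∈ rs.flatMap pvBUpG) := by
  intro rs
  induction rs with
  | nil =>
    intro lb r S P _ _ hlen hnd hS hP
    refine ⟨by simp [pvFlat], by simpa [pvFlat] using hlen, by simpa [pvFlat] using hnd, fun x => ?_⟩
    simp only [pvFlat, List.foldl_nil, List.flatMap_nil]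
    rw [hS x]
    simp [pvFlat]
  | cons se rs ih =>
    intro lb r S P hg hlb hlen hnd hS hP
    obtain ⟨s, e⟩ := se
    obtain ⟨h1, h2, h3, h4⟩ := hg
    have hflatC : ∀ x, x ∈ pvFlat rs → e + 2 ≤ x ∧ x < cnt := pvFlat_bounds cnt rs (e + 2) h4
    simp only [pvFlat, List.foldl_append, List.foldl_cons, List.flatMap_cons]
    by_cases hs0 : 0 < s
    · -- the run moves up: its elements are s..e and s-1 is free
      have hnotS : (s - 1) ∉ S := by
        intro hx
        rcases (hS _).mp hx with hxP | hx2
        · have := hP _ hxP; omega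
        · simp only [pvFlat, List.mem_append, PySem.List.mem_pyRange_one] at hx2
          rcases hx2 with h | h
          · omega
          · have := hflatC _ h; omega
      obtain ⟨n, hn⟩ : ∃ n : Nat, (n : Int) = e - s := ⟨(e - s).toNat, by omega⟩
      obtain ⟨S', heq, hnd', hmem'⟩ := pvMoveUp n s r S (by omega) (by omega) hnd hnotS
        (fun i hi1 hi2 => (hS i).mpr (Or.inr (by
          simp only [pvFlat, List.mem_append, PySem.List.mem_pyRange_one]
          exact Or.inl ⟨hi1, by omega⟩)))
      rw [show e + 1 = s + (n : Int) + 1 from by omega, heq]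
      have hsplice : pvSpliceUp r s (s + (n : Int)) = pvBUpR r (s, e) := by
        rw [pvBUpR, if_pos hs0, show s + (n : Int) = e from by omega]
      obtain ⟨hf1, hf2, hf3, hf4⟩ := ih (e + 2) (pvSpliceUp r s (s + (n : Int))) S'
        (P ++ PySem.List.pyRange (s - 1) e 1) h4 (by omega)
        (by obtain ⟨j, rfl⟩ : ∃ j : Nat, s = (j : Int) := ⟨s.toNat, by omega⟩
            obtain ⟨k, hk⟩ : ∃ k : Nat, (k : Int) = (j : Int) + (n : Int) := ⟨j + n, by push_cast; ring⟩
            rw [show (j : Int) + (n : Int) = (k : Int) from hk.symm,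
              pvSpliceUp_length r j k (by omega) (by omega) (by omega)]
            omega)
        hnd'
        (by intro x
            rw [hmem' x]
            have hSx := hS x
            simp only [pvFlat, List.mem_append, PySem.List.mem_pyRange_one] at hSx ⊢
            rw [hSx]
            have hA : x ∈ P → x ≤ lb - 2 := hP x
            have hC : x ∈ pvFlat rs → e + 2 ≤ x ∧ x < cnt := hflatC x
            by_cases hxP : x ∈ P <;> by_cases hxC : x ∈ pvFlat rs <;>
              (try have hA' := hA ‹x ∈ P›) <;> (try have hC' := hC ‹x ∈ pvFlat rs›) <;>
              simp [hxP, hxC] <;> omega)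
        (by intro p hp
            simp only [List.mem_append, PySem.List.mem_pyRange_one] at hp
            rcases hp with hp | hp
            · have := hP p hp; omega
            · omega)
      refine ⟨?_, hf2, hf3, fun x => ?_⟩
      · rw [hf1, hsplice]
      · rw [hf4 x]
        have hG : pvBUpG (s, e) = PySem.List.pyRange (s - 1) e 1 := by rw [pvBUpG, if_pos hs0]
        simp only [hG, List.mem_append]
        tauto
    · -- s = 0: the run is blocked at the top edge
      have hs0' : s = 0 := by omega
      subst hs0'
      obtain ⟨n, hn⟩ : ∃ n : Nat, (n : Int) = e := ⟨e.toNat, by omega⟩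
      have hskip : (PySem.List.pyRange 0 (e + 1) 1).foldl pvAUp (r, S) = (r, S) := by
        rw [show e + 1 = (n : Int) + 1 from by omega]
        exact pvSkipUp n r S (fun i hi1 hi2 => (hS _).mpr (Or.inr (by
          simp only [pvFlat, List.mem_append, PySem.List.mem_pyRange_one]
          exact Or.inl ⟨by omega, by omega⟩)))
      rw [hskip]
      obtain ⟨hf1, hf2, hf3, hf4⟩ := ih (e + 2) r S (P ++ PySem.List.pyRange 0 (e + 1) 1) h4
        (by omega) hlen hnd
        (by intro x
            have hSx := hS x
            simp only [pvFlat, List.mem_append] at hSx ⊢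
            rw [hSx]
            tauto)
        (by intro p hp
            simp only [List.mem_append, PySem.List.mem_pyRange_one] at hp
            rcases hp with hp | hp
            · have := hP p hp; omega
            · omega)
      refine ⟨?_, hf2, hf3, fun x => ?_⟩
      · rw [hf1, pvBUpR, if_neg hs0]
      · rw [hf4 x]
        have hG : pvBUpG (0, e) = PySem.List.pyRange 0 (e + 1) 1 := by rw [pvBUpG, if_neg hs0]
        simp only [hG, List.mem_append]
        tauto

lemma pvMainDown (cnt : Int) : ∀ (rs : List (Int × Int)) (lb : Int) (r : List Int) (S : PySem.Set Int) (P : List Int),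
    pvGood cnt lb rs → 0 ≤ lb → (r.length : Int) = cnt →
    S.Nodup → (∀ x, x ∈ S ↔ x ∈ P ∨ x ∈ pvFlat rs) → (∀ p ∈ P, p ≤ lb - 2) →
    ((pvFlat rs).foldr (fun idx st => pvADown cnt st idx) (r, S)).1 = rs.reverse.foldl (pvBDownR cnt) r ∧
    (((pvFlat rs).foldr (fun idx st => pvADown cnt st idx) (r, S)).1.length : Int) = cnt ∧
    ((pvFlat rs).foldr (fun idx st => pvADown cnt st idx) (r, S)).2.Nodup ∧
    (∀ x, x ∈ ((pvFlat rs).foldr (fun idx st => pvADown cnt st idx) (r, S)).2 ↔ x ∈ P ∨ x ∈ rs.flatMap (pvBDownG cnt)) := by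
  intro rs
  induction rs with
  | nil =>
    intro lb r S P _ _ hlen hnd hS hP
    refine ⟨by simp [pvFlat], by simpa [pvFlat] using hlen, by simpa [pvFlat] using hnd, fun x => ?_⟩
    simp only [pvFlat, List.foldr_nil, List.flatMap_nil]
    rw [hS x]
    simp [pvFlat]
  | cons se rs ih =>
    intro lb r S P hg hlb hlen hnd hS hP
    obtain ⟨s, e⟩ := se
    obtain ⟨h1, h2, h3, h4⟩ := hg
    have hposC : ∀ x, x ∈ rs.flatMap (pvBDownG cnt) → e + 2 ≤ x ∧ x < cnt := pvDownPos_bounds cnt rs (e + 2) h4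
    simp only [pvFlat, List.foldr_append, List.flatMap_cons, List.reverse_cons, List.foldl_append,
      List.foldl_cons, List.foldl_nil]
    obtain ⟨hf1, hf2, hf3, hf4⟩ := ih (e + 2) r S (P ++ PySem.List.pyRange s (e + 1) 1) h4
      (by omega) hlen hnd
      (by intro x
          have hSx := hS x
          simp only [pvFlat, List.mem_append] at hSx ⊢
          rw [hSx]
          tauto)
      (by intro p hp
          simp only [List.mem_append, PySem.List.mem_pyRange_one] at hp
          rcases hp with hp | hp
          · have := hP p hp; omega
          · omega)
    set st1 := (pvFlat rs).foldr (fun idx st => pvADown cnt st idx) (r, S) with hst1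
    rw [show st1 = (st1.1, st1.2) from rfl]
    by_cases he : e < cnt - 1
    · -- the run moves down: its elements are s..e and e+1 is free
      have hnotS1 : (e + 1) ∉ st1.2 := by
        intro hx
        rcases (hf4 _).mp hx with hxP | hx2
        · simp only [List.mem_append, PySem.List.mem_pyRange_one] at hxP
          rcases hxP with hp | hp
          · have := hP _ hp; omega
          · omega
        · have := hposC _ hx2; omega
      obtain ⟨n, hn⟩ : ∃ n : Nat, (n : Int) = e - s := ⟨(e - s).toNat, by omega⟩
      obtain ⟨S', heq, hnd', hmem'⟩ := pvMoveDown cnt n s st1.1 st1.2 (by omega) (by omega) hf2 hf3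
        (by rw [show s + (n : Int) + 1 = e + 1 from by omega]; exact hnotS1)
        (fun i hi1 hi2 => (hf4 i).mpr (Or.inl (by
          simp only [List.mem_append, PySem.List.mem_pyRange_one]
          exact Or.inr ⟨hi1, by omega⟩)))
      rw [show e + 1 = s + (n : Int) + 1 from by omega, heq]
      have hsplice : pvSpliceDown st1.1 s (s + (n : Int)) = pvBDownR cnt (rs.reverse.foldl (pvBDownR cnt) r) (s, e) := by
        rw [pvBDownR, if_pos he, ← hf1, show s + (n : Int) = e from by omega]
      refine ⟨hsplice, ?_, hnd', fun x => ?_⟩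
      · obtain ⟨j, rfl⟩ : ∃ j : Nat, s = (j : Int) := ⟨s.toNat, by omega⟩
        obtain ⟨k, hk⟩ : ∃ k : Nat, (k : Int) = (j : Int) + (n : Int) := ⟨j + n, by push_cast; ring⟩
        rw [show (j : Int) + (n : Int) = (k : Int) from hk.symm,
          pvSpliceDown_length st1.1 j k (by omega) (by omega)]
        exact hf2
      · rw [hmem' x]
        have hG : pvBDownG cnt (s, e) = PySem.List.pyRange (s + 1) (e + 2) 1 := by
          rw [pvBDownG, if_pos he]
        have hS1x := hf4 x
        simp only [List.mem_append, PySem.List.mem_pyRange_one] at hS1x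
        simp only [hG, List.mem_append, PySem.List.mem_pyRange_one]
        rw [hS1x]
        have hA : x ∈ P → x ≤ lb - 2 := hP x
        have hC : x ∈ rs.flatMap (pvBDownG cnt) → e + 2 ≤ x ∧ x < cnt := hposC x
        by_cases hxP : x ∈ P <;> by_cases hxC : x ∈ rs.flatMap (pvBDownG cnt) <;>
          (try have hA' := hA ‹x ∈ P›) <;> (try have hC' := hC ‹x ∈ rs.flatMap (pvBDownG cnt)›) <;>
          simp [hxP, hxC] <;> omega
    · -- e = cnt - 1: the run is blocked at the bottom edge
      have he' : e = cnt - 1 := by omega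
      obtain ⟨n, hn⟩ : ∃ n : Nat, (n : Int) = e - s := ⟨(e - s).toNat, by omega⟩
      have hskip : (PySem.List.pyRange s (e + 1) 1).foldr (fun idx st => pvADown cnt st idx) (st1.1, st1.2) = (st1.1, st1.2) := by
        rw [show s = cnt - 1 - (n : Int) from by omega, show e + 1 = cnt - 1 + 1 from by omega]
        exact pvSkipDown cnt n st1.1 st1.2 (fun i hi1 hi2 => (hf4 _).mpr (Or.inl (by
          simp only [List.mem_append, PySem.List.mem_pyRange_one]
          exact Or.inr ⟨by omega, by omega⟩)))
      rw [hskip]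
      refine ⟨by rw [pvBDownR, if_neg he, hf1], hf2, hf3, fun x => ?_⟩
      · rw [hf4 x]
        have hG : pvBDownG cnt (s, e) = PySem.List.pyRange s (e + 1) 1 := by
          rw [pvBDownG, if_neg he]
        simp only [hG, List.mem_append]
        tauto

-- ===== VERDICT (by name: the statement is the Claim_ definition above) =====
lemma pvSel_props (selected_indices : List Int) (cnt : Int) :
    (PySem.List.sorted (PySem.Set.ofList (selected_indices.filter (fun idx => decide (0 ≤ idx ∧ idx < cnt)))) (fun x => x) false).Pairwise (· < ·) ∧
    (∀ x ∈ PySem.List.sorted (PySem.Set.ofList (selected_indices.filter (fun idx => decide (0 ≤ idx ∧ idx < cnt)))) (fun x => x) false, 0 ≤ x ∧ x < cnt) := by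
  constructor
  · exact PySem.List.sorted_ofList_pairwise_lt _
  · intro x hx
    rw [PySem.List.mem_sorted, PySem.Set.mem_ofList, List.mem_filter] at hx
    have := hx.2
    simp at this
    exact this

theorem reorder_items_spec : Claim_equal_reorder_items := by
  intro items selected_indices direction _
  unfold Spec_reorder_items reorder_items reorder_items_alt
  simp only []
  set cnt : Int := (items.length : Int) with hcnt
  set sel : List Int := PySem.List.sorted (PySem.Set.ofList (selected_indices.filter (fun idx => decide (0 ≤ idx ∧ idx < cnt)))) (fun x => x) false with hseldef
  obtain ⟨hpw, hbnd⟩ := pvSel_props selected_indices cnt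
  rw [← hseldef] at hpw hbnd
  clear_value sel
  clear hseldef
  by_cases hnil : sel = []
  · simp [hnil]
  · simp only [if_neg hnil]
    obtain ⟨x, xs, rfl⟩ := List.exists_cons_of_ne_nil hnil
    have hnd : (x :: xs).Nodup := hpw.imp (fun h => ne_of_lt h)
    -- B's grouping loop computes pvRunsRec x x xs
    have hs0 : PySem.List.pyGetD (x :: xs) 0 0 = x := PySem.List.pyGetD_zero_cons _ _ _
    have hsl : PySem.List.slice (x :: xs) (some 1) none = xs := by
      rw [PySem.List.slice_from_one]; rfl
    rw [hs0, hsl]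
    set g := xs.foldl pvBGroup ([], x, x) with hg
    have hruns : g.1 ++ [(g.2.1, g.2.2)] = pvRunsRec x x xs := pvBGroup_fold xs [] x x
    rw [hruns]
    set rs := pvRunsRec x x xs with hrs
    have hflat : pvFlat rs = x :: xs := by
      rw [hrs, pvFlat_runsRec xs x x le_rfl, PySem.List.pyRange_one_singleton]
      rfl
    have hgood : pvGood cnt 0 rs :=
      pvGood_runsRec cnt xs 0 x x (hbnd x (by simp)).1 le_rfl (hbnd x (by simp)).2 hpw
        (fun i hi => (hbnd i (by simp [hi])).2)
    have hmemS0 : ∀ y, y ∈ PySem.Set.ofList (x :: xs) ↔ y ∈ ([] : List Int) ∨ y ∈ pvFlat rs := by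
      intro y
      rw [PySem.Set.mem_ofList, hflat]
      simp
    by_cases hdir : (direction == "up") = true
    · simp only [hdir, if_true]
      obtain ⟨hf1, hf2, hf3, hf4⟩ := pvMainUp cnt rs 0 items (PySem.Set.ofList (x :: xs)) []
        hgood le_rfl rfl (PySem.Set.nodup_ofList _) hmemS0 (by simp)
      rw [hflat] at hf1 hf3 hf4
      -- B's fold splits into the result fold and the concatenated position ranges
      have hBsplit : rs.foldl pvBUp (items, []) = (rs.foldl pvBUpR items, [] ++ rs.flatMap pvBUpG) := by
        rw [show pvBUp = (fun (st : List Int × List Int) a => (pvBUpR st.1 a, st.2 ++ pvBUpG a)) from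
          funext fun st => funext fun a => pvBUp_eq st a, pvFoldPair]
      rw [hBsplit]
      refine Prod.ext hf1 ?_
      simp only []
      rw [PySem.List.sorted_id_eq_sorted_id_iff_perm]
      have hndB : (rs.flatMap pvBUpG).Nodup :=
        (pvUpPos_pairwise cnt rs 0 hgood).imp (fun h => ne_of_lt h)
      rw [List.perm_ext_iff_of_nodup hf3 (by simpa using hndB)]
      intro a
      rw [hf4 a]
      simp
    · simp only [hdir, Bool.false_eq_true, if_false]
      have hrev : PySem.List.sorted (x :: xs) (fun y => y) true = (x :: xs).reverse :=
        PySem.List.sorted_rev_eq_of_perm_of_pairwise_gt _ _ _ (List.reverse_perm _)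
          (List.pairwise_reverse.mpr hpw)
      rw [hrev, List.foldl_reverse]
      obtain ⟨hf1, hf2, hf3, hf4⟩ := pvMainDown cnt rs 0 items (PySem.Set.ofList (x :: xs)) []
        hgood le_rfl rfl (PySem.Set.nodup_ofList _) hmemS0 (by simp)
      rw [hflat] at hf1 hf3 hf4
      have hBsplit : rs.reverse.foldl (pvBDown cnt) (items, []) =
          (rs.reverse.foldl (pvBDownR cnt) items, [] ++ rs.reverse.flatMap (pvBDownG cnt)) := by
        rw [show pvBDown cnt = (fun (st : List Int × List Int) a => (pvBDownR cnt st.1 a, st.2 ++ pvBDownG cnt a)) from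
          funext fun st => funext fun a => pvBDown_eq cnt st a, pvFoldPair]
      rw [hBsplit]
      refine Prod.ext hf1 ?_
      simp only []
      rw [PySem.List.sorted_id_eq_sorted_id_iff_perm]
      have hndB : (rs.flatMap (pvBDownG cnt)).Nodup :=
        (pvDownPos_pairwise cnt rs 0 hgood).imp (fun h => ne_of_lt h)
      have hrevperm : (rs.reverse.flatMap (pvBDownG cnt)).Perm (rs.flatMap (pvBDownG cnt)) :=
        (List.reverse_perm rs).flatMap (fun a _ => List.Perm.refl _)
      rw [List.perm_ext_iff_of_nodup hf3 (by simpa using hrevperm.nodup_iff.mpr hndB)]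
      intro a
      rw [hf4 a]
      simp only [List.nil_append, List.mem_append]
      constructor
      · rintro (h | h)
        · exact absurd h (List.not_mem_nil)
        · exact hrevperm.mem_iff.mpr h
      · intro h
        exact Or.inr (hrevperm.mem_iff.mp h)
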